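-- pv_equiv track=rewrite | github.com/pytorch/torchrec | torchrec/distributed/sharding/grid_sharding.py | _preprocess_batch_size_per_rank
-- ===== SOURCE A (Python) =====
-- from typing import Any, Callable, cast, Dict, List, Optional, Set, Tuple, TypeVar, Union
--
-- def _preprocess_batch_size_per_rank(
--     local_size: int, nodes: int, batch_size_per_rank: List[int]
-- ) -> Tuple[List[List[int]], List[int]]:
--     """
--     Reorders `batch_size_per_rank` so it's aligned with reordered features after
--     AlltoAll.
--     """
--     batch_size_per_rank_by_cross_group: List[List[int]] = []
--     batch_size_sum_by_cross_group: List[int] = []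
--     for local_rank in range(local_size):
--         batch_size_per_rank_: List[int] = []
--         batch_size_sum = 0
--         for node in range(nodes):
--             batch_size_per_rank_.append(
--                 batch_size_per_rank[local_rank + node * local_size]
--             )
--             batch_size_sum += batch_size_per_rank[local_rank + node * local_size]
--         batch_size_per_rank_by_cross_group.append(batch_size_per_rank_)
--         batch_size_sum_by_cross_group.append(batch_size_sum)
--
--     return batch_size_per_rank_by_cross_group, batch_size_sum_by_cross_group
-- ===== SOURCE B (Python) =====
-- from typing import List, Tuple
--
--
-- def _preprocess_batch_size_per_rank(
--     local_size: int, nodes: int, batch_size_per_rank: List[int]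
-- ) -> Tuple[List[List[int]], List[int]]:
--     if local_size <= 0:
--         return [], []
--     rows: List[List[int]] = [[] for _ in range(local_size)]
--     sums: List[int] = [0] * local_size
--     for idx in range(local_size * nodes):
--         r = idx % local_size
--         v = batch_size_per_rank[idx]
--         rows[r].append(v)
--         sums[r] += v
--     return rows, sums
-- ===== Notes on version B (the rewrite author's own statement) =====
-- stated objective: alternative
-- what changed: Replaces the nested rank-by-rank loops with strided indexing by one flat pass over range(local_size*nodes) that maintains all local_size rows and partial sums at once, routing element idx to row idx % local_size.
import Mathlib
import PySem

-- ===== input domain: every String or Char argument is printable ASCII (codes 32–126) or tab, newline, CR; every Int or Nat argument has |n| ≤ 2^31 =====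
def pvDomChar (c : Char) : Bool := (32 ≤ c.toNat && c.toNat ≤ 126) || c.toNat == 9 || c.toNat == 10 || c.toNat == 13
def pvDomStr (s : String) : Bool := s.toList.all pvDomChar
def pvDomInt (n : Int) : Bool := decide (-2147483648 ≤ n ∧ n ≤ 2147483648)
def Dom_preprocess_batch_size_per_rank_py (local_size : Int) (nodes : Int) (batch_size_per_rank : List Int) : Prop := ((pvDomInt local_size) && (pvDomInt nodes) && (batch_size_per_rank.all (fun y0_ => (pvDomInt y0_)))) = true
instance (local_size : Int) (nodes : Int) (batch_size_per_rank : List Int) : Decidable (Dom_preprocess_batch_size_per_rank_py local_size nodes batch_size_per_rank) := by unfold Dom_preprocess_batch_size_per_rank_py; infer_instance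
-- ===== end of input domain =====

-- B replaces A's nested rank-by-rank strided loops by one flat pass over range(local_size*nodes)
-- that maintains all local_size rows and partial sums at once (objective: alternative decomposition).

-- ===== PORT A =====
-- literal transliteration of A's nested loops; xs[i] is ported as pyGetD with default 0,
-- exact wherever Python does not raise (Pre_ excludes the IndexError inputs)
def preprocess_batch_size_per_rank_py (local_size : Int) (nodes : Int) (batch_size_per_rank : List Int) : List (List Int) × List Int :=
  (PySem.List.pyRange 0 local_size 1).foldl
    (fun (acc : List (List Int) × List Int) local_rank =>
      let inner : List Int × Int :=
        (PySem.List.pyRange 0 nodes 1).foldl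
          (fun (st : List Int × Int) node =>
            (st.1 ++ [PySem.List.pyGetD batch_size_per_rank (local_rank + node * local_size) 0],
             st.2 + PySem.List.pyGetD batch_size_per_rank (local_rank + node * local_size) 0))
          ([], 0)
      (acc.1 ++ [inner.1], acc.2 ++ [inner.2]))
    ([], [])

-- ===== PORT B =====
-- literal transliteration of Source B: early return for local_size <= 0, otherwise one flat
-- indexed pass routing element idx to row idx % local_size
def preprocess_batch_size_per_rank_py_alt (local_size : Int) (nodes : Int) (batch_size_per_rank : List Int) : List (List Int) × List Int :=
  if local_size ≤ 0 then ([], [])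
  else
    (PySem.List.pyRange 0 (local_size * nodes) 1).foldl
      (fun (acc : List (List Int) × List Int) idx =>
        let r := (PySem.Int.mod idx local_size).toNat
        let v := PySem.List.pyGetD batch_size_per_rank idx 0
        (acc.1.set r ((acc.1.getD r []) ++ [v]), acc.2.set r ((acc.2.getD r 0) + v)))
      (List.replicate local_size.toNat [], List.replicate local_size.toNat 0)

-- ===== PRECONDITION & SPEC =====
-- Pre_ excludes exactly the inputs on which Python A raises IndexError: a positive grid
-- (local_size > 0) whose required local_size*nodes entries exceed len(batch_size_per_rank).
def Pre_preprocess_batch_size_per_rank_py (local_size : Int) (nodes : Int) (batch_size_per_rank : List Int) : Prop :=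
  local_size ≤ 0 ∨ local_size * nodes ≤ (batch_size_per_rank.length : Int)
instance (local_size : Int) (nodes : Int) (batch_size_per_rank : List Int) : Decidable (Pre_preprocess_batch_size_per_rank_py local_size nodes batch_size_per_rank) := by unfold Pre_preprocess_batch_size_per_rank_py; infer_instance

def pvWitness_preprocess_batch_size_per_rank_py : Int × Int × List Int := (2, 3, [1, 2, 3, 4, 5, 6])

def Spec_preprocess_batch_size_per_rank_py (local_size : Int) (nodes : Int) (batch_size_per_rank : List Int) (out : List (List Int) × List Int) : Prop := out = preprocess_batch_size_per_rank_py_alt local_size nodes batch_size_per_rank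
instance (local_size : Int) (nodes : Int) (batch_size_per_rank : List Int) (out : List (List Int) × List Int) : Decidable (Spec_preprocess_batch_size_per_rank_py local_size nodes batch_size_per_rank out) := by unfold Spec_preprocess_batch_size_per_rank_py; infer_instance

-- ===== CLAIM (what is proved, stated in full; the proofs are below) =====
def Claim_equal_preprocess_batch_size_per_rank_py : Prop := ∀ (local_size : Int) (nodes : Int) (batch_size_per_rank : List Int), Dom_preprocess_batch_size_per_rank_py local_size nodes batch_size_per_rank → Pre_preprocess_batch_size_per_rank_py local_size nodes batch_size_per_rank → Spec_preprocess_batch_size_per_rank_py local_size nodes batch_size_per_rank (preprocess_batch_size_per_rank_py local_size nodes batch_size_per_rank)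

-- ===== LEMMAS AND PROOFS =====

-- pyRange over a nonpositive bound is empty
theorem pvRange_nonpos (b : Int) (h : b ≤ 0) : PySem.List.pyRange 0 b 1 = [] := by
  rw [List.eq_nil_iff_forall_not_mem]
  intro k hk
  rw [PySem.List.mem_pyRange_one] at hk
  omega

-- setting index r of a map over range, r < L
theorem pvSet_map_range {β : Type} (f : Nat → β) (L r : Nat) (x : β) :
    ((List.range L).map f).set r x = (List.range L).map (fun i => if i = r then x else f i) := by
  apply List.ext_getElem
  · simp
  · intro i h1 h2
    simp only [List.getElem_set, List.getElem_map, List.getElem_range]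
    rcases eq_or_ne r i with h | h
    · subst h; simp
    · rw [if_neg h, if_neg (Ne.symm h)]

-- B's flat loop, characterised: each row/sum position r collects exactly the elements
-- whose index i has i % local_size = r, in order
theorem pvBfold (ls : Int) (hls : 0 < ls) (bs : List Int) (idxs : List Int)
    (rowF : Nat → List Int) (sumF : Nat → Int) :
    idxs.foldl
      (fun (acc : List (List Int) × List Int) idx =>
        let r := (PySem.Int.mod idx ls).toNat
        let v := PySem.List.pyGetD bs idx 0
        (acc.1.set r ((acc.1.getD r []) ++ [v]), acc.2.set r ((acc.2.getD r 0) + v)))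
      ((List.range ls.toNat).map rowF, (List.range ls.toNat).map sumF)
    = ((List.range ls.toNat).map (fun r =>
          rowF r ++ (idxs.filter (fun i => (PySem.Int.mod i ls).toNat = r)).map
            (fun i => PySem.List.pyGetD bs i 0)),
       (List.range ls.toNat).map (fun r =>
          sumF r + ((idxs.filter (fun i => (PySem.Int.mod i ls).toNat = r)).map
            (fun i => PySem.List.pyGetD bs i 0)).sum)) := by
  induction idxs generalizing rowF sumF with
  | nil => simp
  | cons i rest ih =>
    have hr0 : (PySem.Int.mod i ls).toNat < ls.toNat := by
      have h1 := PySem.Int.mod_nonneg i hls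
      have h2 := PySem.Int.mod_lt i hls
      omega
    simp only [List.foldl_cons]
    rw [PySem.List.getD_map_range rowF ls.toNat _ [] hr0,
        PySem.List.getD_map_range sumF ls.toNat _ 0 hr0,
        pvSet_map_range rowF ls.toNat _ _,
        pvSet_map_range sumF ls.toNat _ _,
        ih]
    have key : ∀ (r : Nat),
        (((i :: rest).filter (fun j => (PySem.Int.mod j ls).toNat = r)).map
            (fun j => PySem.List.pyGetD bs j 0))
        = (if (PySem.Int.mod i ls).toNat = r
             then PySem.List.pyGetD bs i 0 ::
               ((rest.filter (fun j => (PySem.Int.mod j ls).toNat = r)).map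
                 (fun j => PySem.List.pyGetD bs j 0))
             else ((rest.filter (fun j => (PySem.Int.mod j ls).toNat = r)).map
                 (fun j => PySem.List.pyGetD bs j 0))) := by
      intro r
      rw [List.filter_cons]
      by_cases hc : (PySem.Int.mod i ls).toNat = r <;> simp [hc]
    refine Prod.ext ?_ ?_ <;> simp only
    · apply List.map_congr_left
      intro r _
      rw [key r]
      by_cases hc : (PySem.Int.mod i ls).toNat = r
      · rw [if_pos hc, if_pos hc.symm, hc]
        simp
      · rw [if_neg hc, if_neg (fun h => hc h.symm)]
    · apply List.map_congr_left
      intro r _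
      rw [key r]
      by_cases hc : (PySem.Int.mod i ls).toNat = r
      · rw [if_pos hc, if_pos hc.symm, hc]
        simp
        ring
      · rw [if_neg hc, if_neg (fun h => hc h.symm)]

-- (range L).filter (· = r) = [r] for r < L
theorem pvFilter_range_self (L r : Nat) :
    r < L → (List.range L).filter (fun t => t = r) = [r] := by
  induction L with
  | zero => intro h; omega
  | succ n ih =>
    intro h
    rw [List.range_succ, List.filter_append]
    by_cases hc : r < n
    · have h1 : (List.filter (fun t => t = r) [n]) = [] := by
        simp
        omega
      rw [ih hc, h1, List.append_nil]
    · have hrn : r = n := by omega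
      subst hrn
      have h1 : (List.range r).filter (fun t => t = r) = [] := by
        rw [List.filter_eq_nil_iff]
        intro a ha
        simp only [List.mem_range] at ha
        simp
        omega
      rw [h1]
      simp

-- indices in range(L*N) congruent to r mod L, in order
theorem pvFilter_range (L N r : Nat) (hr : r < L) :
    ((List.range (L * N)).filter (fun k => k % L = r)) = (List.range N).map (fun j => r + j * L) := by
  induction N with
  | zero => simp
  | succ n ih =>
    have h1 : L * (n + 1) = L * n + L := by ring
    rw [h1, List.range_add, List.filter_append, ih, List.range_succ, List.map_append]
    congr 1
    rw [List.filter_map]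
    have h2 : (List.range L).filter ((fun k => decide (k % L = r)) ∘ (fun t => L * n + t))
        = (List.range L).filter (fun t => t = r) := by
      apply List.filter_congr
      intro t ht
      simp only [List.mem_range] at ht
      simp [Function.comp, Nat.mod_eq_of_lt ht]
    rw [h2, pvFilter_range_self L r hr]
    simp [Nat.add_comm, Nat.mul_comm]

-- the row of rank r, in closed form: B's filtered flat indices are A's strided indices
theorem pvRow (L N r : Nat) (bs : List Int) (hr : r < L) :
    ((((List.range (L * N)).map (fun (k : Nat) => (k : Int))).filter
        (fun i => (PySem.Int.mod i (L : Int)).toNat = r)).map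
      (fun i => PySem.List.pyGetD bs i 0))
    = (List.range N).map (fun (k : Nat) => PySem.List.pyGetD bs ((r : Int) + (k : Int) * (L : Int)) 0) := by
  have hfm : (((List.range (L * N)).map (fun (k : Nat) => (k : Int))).filter
        (fun i => (PySem.Int.mod i (L : Int)).toNat = r))
      = ((List.range (L * N)).filter
          (fun (k : Nat) => (PySem.Int.mod (k : Int) (L : Int)).toNat = r)).map
          (fun (k : Nat) => (k : Int)) := by
    rw [List.filter_map]
    rfl
  have hcong : (List.range (L * N)).filter
        (fun (k : Nat) => (PySem.Int.mod (k : Int) (L : Int)).toNat = r)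
      = (List.range (L * N)).filter (fun k => k % L = r) := by
    apply List.filter_congr
    intro k _
    simp only [PySem.Int.mod_natCast, Int.toNat_natCast]
  rw [hfm, hcong, pvFilter_range L N r hr, List.map_map, List.map_map]
  apply List.map_congr_left
  intro j _
  simp only [Function.comp_def]
  have hc : ((r : Int) + (j : Int) * (L : Int)) = ((r + j * L : Nat) : Int) := by
    push_cast
    ring
  rw [hc]

-- A's outer loop: a pair fold appending one row and one sum per rank = a pair of maps
theorem pvFoldPairAppend {α : Type} (h1 : α → List Int) (h2 : α → Int) (l : List α) :
    l.foldl (fun (acc : List (List Int) × List Int) x =>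
      (acc.1 ++ [h1 x], acc.2 ++ [h2 x])) ([], []) = (l.map h1, l.map h2) := by
  rw [PySem.List.foldl_prod_mk (fun (a : List (List Int)) x => a ++ [h1 x])
        (fun (b : List Int) x => b ++ [h2 x]),
      PySem.List.foldl_append_singleton_eq_map, PySem.List.foldl_append_singleton_eq_map]
  simp

-- A's inner loop: collects the strided elements and their running sum
theorem pvFoldPairSum (f : Int → Int) (l : List Int) :
    l.foldl (fun (st : List Int × Int) x => (st.1 ++ [f x], st.2 + f x)) ([], 0)
    = (l.map f, 0 + (l.map f).sum) := by
  rw [PySem.List.foldl_prod_mk (fun (a : List Int) x => a ++ [f x]) (fun (b : Int) x => b + f x),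
      PySem.List.foldl_append_singleton_eq_map,
      PySem.List.foldl_add l f 0]
  simp

-- ===== VERDICT (by name: the statement is the Claim_ definition above) =====
theorem preprocess_batch_size_per_rank_py_spec : Claim_equal_preprocess_batch_size_per_rank_py := by
  intro ls nodes bs _hdom _hpre
  unfold Spec_preprocess_batch_size_per_rank_py
  unfold preprocess_batch_size_per_rank_py preprocess_batch_size_per_rank_py_alt
  by_cases hls : ls ≤ 0
  · rw [if_pos hls, pvRange_nonpos ls hls]
    rfl
  · rw [if_neg hls]
    replace hls : (0 : Int) < ls := by omega
    obtain ⟨L, rfl⟩ := Int.eq_ofNat_of_zero_le hls.le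
    -- B's side in closed form
    have hrep1 : (List.replicate ((L : Int)).toNat ([] : List Int))
        = (List.range ((L : Int)).toNat).map (fun _ => ([] : List Int)) := by
      simp [List.map_const']
    have hrep2 : (List.replicate ((L : Int)).toNat (0 : Int))
        = (List.range ((L : Int)).toNat).map (fun _ => (0 : Int)) := by
      simp [List.map_const']
    rw [hrep1, hrep2, pvBfold (L : Int) hls bs _ (fun _ => []) (fun _ => 0)]
    -- A's side: zeta-expand the let, then closed forms of the two loops
    have hbody : (fun (acc : List (List Int) × List Int) local_rank =>
          let inner : List Int × Int :=
            (PySem.List.pyRange 0 nodes 1).foldl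
              (fun (st : List Int × Int) node =>
                (st.1 ++ [PySem.List.pyGetD bs (local_rank + node * (L : Int)) 0],
                 st.2 + PySem.List.pyGetD bs (local_rank + node * (L : Int)) 0))
              ([], 0)
          (acc.1 ++ [inner.1], acc.2 ++ [inner.2]))
        = (fun (acc : List (List Int) × List Int) local_rank =>
          (acc.1 ++ [((PySem.List.pyRange 0 nodes 1).foldl
              (fun (st : List Int × Int) node =>
                (st.1 ++ [PySem.List.pyGetD bs (local_rank + node * (L : Int)) 0],
                 st.2 + PySem.List.pyGetD bs (local_rank + node * (L : Int)) 0))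
              ([], 0)).1],
           acc.2 ++ [((PySem.List.pyRange 0 nodes 1).foldl
              (fun (st : List Int × Int) node =>
                (st.1 ++ [PySem.List.pyGetD bs (local_rank + node * (L : Int)) 0],
                 st.2 + PySem.List.pyGetD bs (local_rank + node * (L : Int)) 0))
              ([], 0)).2])) := rfl
    rw [hbody, pvFoldPairAppend]
    have hinner : ∀ lr : Int,
        ((PySem.List.pyRange 0 nodes 1).foldl
          (fun (st : List Int × Int) node =>
            (st.1 ++ [PySem.List.pyGetD bs (lr + node * (L : Int)) 0],
             st.2 + PySem.List.pyGetD bs (lr + node * (L : Int)) 0))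
          ([], 0))
        = ((PySem.List.pyRange 0 nodes 1).map
             (fun node => PySem.List.pyGetD bs (lr + node * (L : Int)) 0),
           0 + ((PySem.List.pyRange 0 nodes 1).map
             (fun node => PySem.List.pyGetD bs (lr + node * (L : Int)) 0)).sum) :=
      fun lr => pvFoldPairSum (fun node => PySem.List.pyGetD bs (lr + node * (L : Int)) 0) _
    simp only [hinner]
    by_cases hn : nodes ≤ 0
    · -- no nodes: every row is empty and every sum 0 on both sides
      have hmn : (L : Int) * nodes ≤ 0 := by
        have := mul_le_mul_of_nonneg_left hn hls.le
        simpa using this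
      rw [pvRange_nonpos nodes hn, pvRange_nonpos _ hmn,
          PySem.List.pyRange_zero_natCast L]
      simp [List.map_map, Function.comp_def, Int.toNat_natCast, List.map_const']
    · replace hn : (0 : Int) < nodes := by omega
      obtain ⟨N, rfl⟩ := Int.eq_ofNat_of_zero_le hn.le
      have hmul : ((L : Int)) * ((N : Int)) = ((L * N : Nat) : Int) := by
        push_cast
        ring
      rw [hmul, PySem.List.pyRange_zero_natCast (L * N), PySem.List.pyRange_zero_natCast L,
          PySem.List.pyRange_zero_natCast N]
      simp only [List.map_map, Int.toNat_natCast]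
      refine Prod.ext ?_ ?_ <;> simp only
      · apply List.map_congr_left
        intro r hrmem
        simp only [List.mem_range] at hrmem
        simp only [Function.comp_def, List.nil_append]
        rw [pvRow L N r bs hrmem]
      · apply List.map_congr_left
        intro r hrmem
        simp only [List.mem_range] at hrmem
        simp only [Function.comp_def]
        rw [pvRow L N r bs hrmem]
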